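-- pv_equiv track=rewrite | github.com/HassoPlattnerInstituteHCI/Algorithmic-Folding | reconstruct.py | cut_face
-- ===== SOURCE A (Python) =====
-- def cut_face(face, s_line):
--     edges = [(face[i - 1], v) for i, v in enumerate(face)]
--     fa = [(s_line)]
--     fb = []
--     appending = False
--     for e in edges:
--         if e[0] == s_line[1]:
--             appending = True
--
--         if appending:
--             fa.append(e)
--         else:
--             fb.append(e)
--
--         if e[1] == s_line[0]:
--             appending = False
--
--     fb.append(s_line[::-1])
--     collapse = lambda face : [e[0] for e in face]
--     return collapse(fa), collapse(fb)
-- ===== SOURCE B (Python) =====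
-- def cut_face(face, s_line):
--     # Index-jump reimplementation: instead of a per-edge boolean state machine,
--     # repeatedly locate the next trigger (previous vertex == s_line[1]) and the
--     # next stop (vertex == s_line[0]) with list.index, and move whole cyclic
--     # slices of vertices into fb / fa.
--     s0, s1 = s_line
--     n = len(face)
--     prev = face[-1:] + face[:-1]
--     fa, fb = [s0], []
--     i = 0
--     while i < n:
--         try:
--             j = prev.index(s1, i)
--         except ValueError:
--             j = n
--         fb.extend(prev[i:j])
--         if j == n:
--             break
--         try:
--             k = face.index(s0, j)
--         except ValueError:
--             k = n
--         fa.extend(prev[j:k + 1])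
--         i = k + 1
--     fb.append(s1)
--     return fa, fb
-- ===== Notes on version B (the rewrite author's own statement) =====
-- stated objective: alternative
-- what changed: Replaces A's per-edge boolean state machine over materialized (prev, vertex) edge tuples with direct position lookups (list.index with a start offset) and whole-slice extends: fb and fa are built from cyclic slices between successive trigger/stop indices, never forming edge tuples or a collapse pass.
import Mathlib
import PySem

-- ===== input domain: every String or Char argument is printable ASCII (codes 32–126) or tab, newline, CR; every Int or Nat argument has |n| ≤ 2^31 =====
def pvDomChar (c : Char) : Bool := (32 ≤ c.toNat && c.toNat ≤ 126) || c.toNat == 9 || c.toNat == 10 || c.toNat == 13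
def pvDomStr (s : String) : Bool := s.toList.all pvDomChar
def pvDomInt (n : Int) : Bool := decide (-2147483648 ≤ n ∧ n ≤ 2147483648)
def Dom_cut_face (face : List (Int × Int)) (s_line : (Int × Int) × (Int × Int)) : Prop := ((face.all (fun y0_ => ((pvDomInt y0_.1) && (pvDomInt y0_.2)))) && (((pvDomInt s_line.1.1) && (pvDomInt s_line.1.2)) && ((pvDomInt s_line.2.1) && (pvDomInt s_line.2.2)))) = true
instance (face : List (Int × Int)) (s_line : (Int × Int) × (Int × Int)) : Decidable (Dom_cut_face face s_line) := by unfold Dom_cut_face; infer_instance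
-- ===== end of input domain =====

-- B replaces A's per-edge boolean state machine by index jumps (list.index) plus
-- cyclic slices; same return value, objective: alternative decomposition.

-- ===== PORT A =====
-- the body of A's `for e in edges` loop, as a named step function
def stepA (s0 s1 : Int × Int)
    (st : List ((Int × Int) × (Int × Int)) × List ((Int × Int) × (Int × Int)) × Bool)
    (e : (Int × Int) × (Int × Int)) :
    List ((Int × Int) × (Int × Int)) × List ((Int × Int) × (Int × Int)) × Bool :=
  let appending := st.2.2 || (e.1 == s1)
  let p := if appending then (st.1 ++ [e], st.2.1) else (st.1, st.2.1 ++ [e])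
  (p.1, p.2, appending && !(e.2 == s0))

def cut_face (face : List (Int × Int)) (s_line : (Int × Int) × (Int × Int)) :
    (List (Int × Int)) × (List (Int × Int)) :=
  -- edges = [(face[i-1], v) for i, v in enumerate(face)]; the index i-1 is always
  -- in range (i ranges over a nonempty face), so pyGetD's default is never used
  let edges := (PySem.List.enumerate face).map
    (fun iv => (PySem.List.pyGetD face (iv.1 - 1) (0, 0), iv.2))
  let r := edges.foldl (stepA s_line.1 s_line.2) ([s_line], [], false)
  -- s_line[::-1] on a 2-tuple is the swapped tuple
  (r.1.map Prod.fst, (r.2.1 ++ [(s_line.2, s_line.1)]).map Prod.fst)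

-- ===== PORT B =====
-- prev.index(x, i) wrapped in try/except with fallback n
def pyFindFrom {α : Type} [BEq α] (xs : List α) (x : α) (i n : Nat) : Nat :=
  match PySem.List.index? (xs.drop i) x with
  | some j => i + j
  | none => n

lemma pyFindFrom_lb {α : Type} [BEq α] (xs : List α) (x : α) (i n : Nat) :
    i ≤ pyFindFrom xs x i n ∨ pyFindFrom xs x i n = n := by
  unfold pyFindFrom
  cases PySem.List.index? (xs.drop i) x with
  | none => exact Or.inr rfl
  | some j => exact Or.inl (Nat.le_add_right i j)

-- the while-loop of B
def cutLoop (prev face : List (Int × Int)) (s0 s1 : Int × Int) (n i : Nat)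
    (fa fb : List (Int × Int)) : (List (Int × Int)) × (List (Int × Int)) :=
  if hi : i < n then
    let j := pyFindFrom prev s1 i n
    let fb' := fb ++ PySem.List.slice prev (some (i : Int)) (some (j : Int))
    if hj : j = n then (fa, fb')
    else
      let k := pyFindFrom face s0 j n
      let fa' := fa ++ PySem.List.slice prev (some (j : Int)) (some ((k : Int) + 1))
      cutLoop prev face s0 s1 n (k + 1) fa' fb'
  else (fa, fb)
termination_by n - i
decreasing_by
  have h1 := pyFindFrom_lb prev s1 i n
  have h2 := pyFindFrom_lb face s0 (pyFindFrom prev s1 i n) n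
  simp only [pyFindFrom] at *
  omega

def cut_face_alt (face : List (Int × Int)) (s_line : (Int × Int) × (Int × Int)) :
    (List (Int × Int)) × (List (Int × Int)) :=
  let s0 := s_line.1
  let s1 := s_line.2
  let n := face.length
  -- prev = face[-1:] + face[:-1]
  let prev := PySem.List.slice face (some (-1)) none ++ PySem.List.slice face none (some (-1))
  let r := cutLoop prev face s0 s1 n 0 [s0] []
  (r.1, r.2 ++ [s1])

-- ===== PRECONDITION & SPEC =====
def Spec_cut_face (face : List (Int × Int)) (s_line : (Int × Int) × (Int × Int)) (out : (List (Int × Int)) × (List (Int × Int))) : Prop := out = cut_face_alt face s_line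
instance (face : List (Int × Int)) (s_line : (Int × Int) × (Int × Int)) (out : (List (Int × Int)) × (List (Int × Int))) : Decidable (Spec_cut_face face s_line out) := by unfold Spec_cut_face; infer_instance

-- ===== CLAIM (what is proved, stated in full; the proofs are below) =====
def Claim_equal_cut_face : Prop := ∀ (face : List (Int × Int)) (s_line : (Int × Int) × (Int × Int)), Dom_cut_face face s_line → Spec_cut_face face s_line (cut_face face s_line)

-- ===== LEMMAS AND PROOFS =====

lemma stepA_false {s0 s1 : Int × Int} {fa fb : List ((Int × Int) × (Int × Int))}
    (e : (Int × Int) × (Int × Int)) (h : e.1 ≠ s1) :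
    stepA s0 s1 (fa, fb, false) e = (fa, fb ++ [e], false) := by
  simp [stepA, h]

lemma stepA_trigger {s0 s1 : Int × Int} {fa fb : List ((Int × Int) × (Int × Int))}
    (e : (Int × Int) × (Int × Int)) (h : e.1 = s1) :
    stepA s0 s1 (fa, fb, false) e = (fa ++ [e], fb, !(e.2 == s0)) := by
  simp [stepA, h]

lemma stepA_true {s0 s1 : Int × Int} {fa fb : List ((Int × Int) × (Int × Int))}
    (e : (Int × Int) × (Int × Int)) :
    stepA s0 s1 (fa, fb, true) e = (fa ++ [e], fb, !(e.2 == s0)) := by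
  simp [stepA]

lemma foldl_stepA_false (s0 s1 : Int × Int) :
    ∀ (seg : List ((Int × Int) × (Int × Int))) (fa fb : List ((Int × Int) × (Int × Int))),
    (∀ e ∈ seg, e.1 ≠ s1) →
    seg.foldl (stepA s0 s1) (fa, fb, false) = (fa, fb ++ seg, false) := by
  intro seg
  induction seg with
  | nil => simp
  | cons e t ih =>
    intro fa fb h
    rw [List.foldl_cons, stepA_false e (h e (by simp))]
    rw [ih fa (fb ++ [e]) (fun x hx => h x (by simp [hx]))]
    simp

lemma foldl_stepA_true (s0 s1 : Int × Int) :
    ∀ (seg : List ((Int × Int) × (Int × Int))) (fa fb : List ((Int × Int) × (Int × Int))),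
    (∀ e ∈ seg, e.2 ≠ s0) →
    seg.foldl (stepA s0 s1) (fa, fb, true) = (fa ++ seg, fb, true) := by
  intro seg
  induction seg with
  | nil => simp
  | cons e t ih =>
    intro fa fb h
    rw [List.foldl_cons, stepA_true e]
    have : (!(e.2 == s0)) = true := by
      simp [h e (by simp)]
    rw [this, ih (fa ++ [e]) fb (fun x hx => h x (by simp [hx]))]
    simp

lemma pyFindFrom_spec {α : Type} [BEq α] [LawfulBEq α] (xs : List α) (x : α) (i n : Nat) :
    (pyFindFrom xs x i n = n ∧ ∀ t (ht : t < xs.length), i ≤ t → xs[t] ≠ x) ∨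
    (i ≤ pyFindFrom xs x i n ∧ ∃ (h : pyFindFrom xs x i n < xs.length),
      xs[pyFindFrom xs x i n] = x ∧
      ∀ t (ht : t < xs.length), i ≤ t → t < pyFindFrom xs x i n → xs[t] ≠ x) := by
  unfold pyFindFrom
  cases hidx : PySem.List.index? (xs.drop i) x with
  | none =>
    left
    rw [PySem.List.index?_eq_none_iff] at hidx
    refine ⟨rfl, ?_⟩
    intro t ht hit hx
    apply hidx
    have h1 : t - i < (xs.drop i).length := by simp; omega
    have h2 : (xs.drop i)[t - i] = x := by
      rw [List.getElem_drop]
      have e : i + (t - i) = t := by omega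
      simp only [e]
      exact hx
    rw [← h2]; exact List.getElem_mem h1
  | some j =>
    right
    obtain ⟨hj, hx, hmin⟩ := PySem.List.getElem_of_index?_eq_some hidx
    have hjlen : i + j < xs.length := by simp at hj; omega
    refine ⟨Nat.le_add_right i j, hjlen, ?_, ?_⟩

    · rw [← hx, List.getElem_drop]
    · intro t ht hit htj hxt
      have htj' : t < i + j := htj
      have h1 : t - i < j := by omega
      apply hmin (t - i) h1
      rw [List.getElem_drop]
      have e : i + (t - i) = t := by omega
      simp only [e]
      exact hxt

lemma cutLoop_done (prev face : List (Int × Int)) (s0 s1 : Int × Int) (n i : Nat)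
    (fa fb : List (Int × Int)) (hi : ¬ i < n) :
    cutLoop prev face s0 s1 n i fa fb = (fa, fb) := by
  rw [cutLoop]; simp [hi]

lemma cutLoop_stop (prev face : List (Int × Int)) (s0 s1 : Int × Int) (n i : Nat)
    (fa fb : List (Int × Int)) (hi : i < n) (hj : pyFindFrom prev s1 i n = n) :
    cutLoop prev face s0 s1 n i fa fb =
      (fa, fb ++ PySem.List.slice prev (some (i : Int)) (some (n : Int))) := by
  rw [cutLoop]; simp [hi, hj]

lemma cutLoop_step (prev face : List (Int × Int)) (s0 s1 : Int × Int) (n i : Nat)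
    (fa fb : List (Int × Int)) (hi : i < n) (hj : ¬ pyFindFrom prev s1 i n = n) :
    cutLoop prev face s0 s1 n i fa fb =
      cutLoop prev face s0 s1 n (pyFindFrom face s0 (pyFindFrom prev s1 i n) n + 1)
        (fa ++ PySem.List.slice prev (some ((pyFindFrom prev s1 i n) : Int))
          (some ((pyFindFrom face s0 (pyFindFrom prev s1 i n) n : Int) + 1)))
        (fb ++ PySem.List.slice prev (some (i : Int)) (some ((pyFindFrom prev s1 i n) : Int))) := by
  rw [cutLoop]; simp [hi, hj]

lemma hseg_map (prev face : List (Int × Int)) (hlen : prev.length = face.length) (a b : Nat) :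
    (((prev.zip face).drop a).take b).map Prod.fst = (prev.drop a).take b := by
  apply List.ext_getElem
  · simp [hlen]
  · intro t h1 h2
    simp only [List.getElem_map, List.getElem_take, List.getElem_drop, List.getElem_zip]

lemma hmem_seg (prev face : List (Int × Int)) (a b : Nat) (e : (Int × Int) × (Int × Int))
    (hm : e ∈ ((prev.zip face).drop a).take b) :
    ∃ (t : Nat) (h1 : t < prev.length) (h2 : t < face.length),
      a ≤ t ∧ t < a + b ∧ e = (prev[t], face[t]) := by
  rw [List.mem_iff_getElem] at hm
  obtain ⟨k, hk, he⟩ := hm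
  have hk' : k < ((prev.zip face).drop a).length := (List.length_take .. ▸ hk : _) |>.trans_le (by simp)
  refine ⟨a + k, ?_, ?_, Nat.le_add_right a k, ?_, ?_⟩
  · simp at hk'; omega
  · simp at hk'; omega
  · simp [List.length_take, List.length_drop, List.length_zip] at hk; omega
  · rw [← he, List.getElem_take, List.getElem_drop, List.getElem_zip]

lemma cut_main (s0 s1 : Int × Int) (prev face : List (Int × Int))
    (hlen : prev.length = face.length) :
    ∀ (m i : Nat) (fa fb : List ((Int × Int) × (Int × Int))), face.length - i ≤ m →
    ((((prev.zip face).drop i).foldl (stepA s0 s1) (fa, fb, false)).1.map Prod.fst,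
     (((prev.zip face).drop i).foldl (stepA s0 s1) (fa, fb, false)).2.1.map Prod.fst) =
    cutLoop prev face s0 s1 face.length i (fa.map Prod.fst) (fb.map Prod.fst) := by
  intro m
  induction m with
  | zero =>
    intro i fa fb hm
    have hge : ¬ i < face.length := by omega
    rw [cutLoop_done _ _ _ _ _ _ _ _ hge]
    rw [List.drop_eq_nil_of_le (by simp; omega)]
    simp
  | succ m ih =>
    intro i fa fb hm
    by_cases hin : i < face.length
    case neg =>
      rw [cutLoop_done _ _ _ _ _ _ _ _ hin]
      rw [List.drop_eq_nil_of_le (by simp; omega)]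
      simp
    case pos =>
    rcases pyFindFrom_spec prev s1 i face.length with ⟨hjn, hno⟩ | ⟨hij, hjlt, hjval, hjmin⟩
    · -- no trigger from i on: everything goes to fb, loop emits slice and stops
      rw [cutLoop_stop _ _ _ _ _ _ _ _ hin hjn]
      have hall : ∀ e ∈ (prev.zip face).drop i, e.1 ≠ s1 := by
        intro e he
        rw [← List.take_of_length_le (Nat.le_refl ((prev.zip face).drop i).length)] at he
        obtain ⟨t, h1, h2, hat, _, hee⟩ := hmem_seg prev face i _ e he
        rw [hee]
        exact hno t h1 hat
      rw [foldl_stepA_false s0 s1 _ fa fb hall]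
      simp only [List.map_append]
      rw [← List.take_of_length_le (Nat.le_refl ((prev.zip face).drop i).length),
        hseg_map prev face hlen]
      rw [PySem.List.slice_natCast]
      congr 3
      simp [hlen]
    · -- trigger found at j = pyFindFrom prev s1 i
      set j := pyFindFrom prev s1 i face.length with hj_def
      have hjn : j < face.length := by rw [← hlen]; exact hjlt
      have hsplit : (prev.zip face).drop i =
          ((prev.zip face).drop i).take (j - i) ++ (prev.zip face).drop j := by
        conv_lhs => rw [← List.take_append_drop (j - i) ((prev.zip face).drop i)]
        congr 1
        rw [List.drop_drop]
        congr 1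
        omega
      rw [hsplit, List.foldl_append]
      have hseg1 : ∀ e ∈ ((prev.zip face).drop i).take (j - i), e.1 ≠ s1 := by
        intro e he
        obtain ⟨t, h1, h2, hat, hlt, hee⟩ := hmem_seg prev face i _ e he
        rw [hee]
        exact hjmin t h1 hat (by omega)
      rw [foldl_stepA_false s0 s1 _ fa fb hseg1]
      have hjzip : j < (prev.zip face).length := by simp [hlen]; omega
      rw [List.drop_eq_getElem_cons hjzip, List.foldl_cons, List.getElem_zip,
        stepA_trigger _ (by exact hjval)]
      rw [cutLoop_step _ _ _ _ _ _ _ _ hin (by omega)]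
      rw [PySem.List.slice_natCast]
      set k := pyFindFrom face s0 j face.length with hk_def
      rcases pyFindFrom_spec face s0 j face.length with ⟨hkn, hno2⟩ | ⟨hjk, hklt, hkval, hkmin⟩
      · -- no stop: the rest of the edges all go to fa, loop stops after this round
        rw [← hk_def] at hkn
        have hb : (!(face[j] == s0)) = true := by
          simp only [Bool.not_eq_true', beq_eq_false_iff_ne, ne_eq]
          exact hno2 j hjn (Nat.le_refl j)
        rw [hb]
        have hall2 : ∀ e ∈ (prev.zip face).drop (j + 1), e.2 ≠ s0 := by
          intro e he
          rw [← List.take_of_length_le (Nat.le_refl ((prev.zip face).drop (j + 1)).length)] at he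
          obtain ⟨t, h1, h2, hat, _, hee⟩ := hmem_seg prev face (j + 1) _ e he
          rw [hee]
          exact hno2 t h2 (by omega)
        rw [foldl_stepA_true s0 s1 _ _ _ hall2]
        rw [hkn, cutLoop_done _ _ _ _ _ _ _ _ (by omega)]
        have hcast : ((face.length : Int) + 1) = ((face.length + 1 : Nat) : Int) := by push_cast; ring
        rw [hcast, PySem.List.slice_natCast]
        simp only [List.map_append]
        congr 1
        · -- fa components
          rw [List.append_assoc]
          congr 1
          have hdj : prev.drop j = prev[j] :: prev.drop (j + 1) := List.drop_eq_getElem_cons hjlt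
          rw [List.take_of_length_le (by simp; omega), hdj]
          simp only [List.map_cons, List.map_nil, List.cons_append,
            List.nil_append]
          congr 1
          rw [← List.take_of_length_le (Nat.le_refl ((prev.zip face).drop (j + 1)).length),
            hseg_map prev face hlen]
          rw [List.take_of_length_le (by simp [hlen])]
        · -- fb components
          rw [hseg_map prev face hlen, ← hj_def]
      · -- stop at k
        simp only [← hk_def] at hjk hklt hkval hkmin
        by_cases hkj : k = j
        · -- the trigger edge itself is the stop: state back to False, recurse at k+1
          have hb : (!(face[j] == s0)) = false := by
            simp only [Bool.not_eq_false', beq_iff_eq]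
            simp only [hkj] at hkval
            exact hkval
          rw [hb]
          have := ih (j + 1) (fa ++ [(prev[j], face[j])]) (fb ++ ((prev.zip face).drop i).take (j - i)) (by omega)
          rw [this]
          simp only [hkj]
          congr 1
          · simp only [List.map_append, List.map_cons, List.map_nil]
            congr 1
            have hcast : ((j : Int) + 1) = ((j + 1 : Nat) : Int) := by push_cast; ring
            rw [hcast, PySem.List.slice_natCast]
            have h1 : j + 1 - j = 1 := by omega
            have h1' : List.take 1 (List.drop j prev) = [prev[j]] := by
              rw [List.take_one_drop_eq_of_lt_length hjlt]
              simp
            rw [h1, h1']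
          · simp only [List.map_append]
            rw [hseg_map prev face hlen]
        · -- stop strictly later: a True segment, then the stop edge, recurse at k+1
          have hjk' : j < k := by omega
          have hb : (!(face[j] == s0)) = true := by
            simp only [Bool.not_eq_true', beq_eq_false_iff_ne, ne_eq]
            exact hkmin j hjn (Nat.le_refl j) hjk'
          rw [hb]
          have hsplit2 : (prev.zip face).drop (j + 1) =
              ((prev.zip face).drop (j + 1)).take (k - (j + 1)) ++ (prev.zip face).drop k := by
            conv_lhs => rw [← List.take_append_drop (k - (j + 1)) ((prev.zip face).drop (j + 1))]
            congr 1
            rw [List.drop_drop]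
            congr 1
            omega
          rw [hsplit2, List.foldl_append]
          have hseg2 : ∀ e ∈ ((prev.zip face).drop (j + 1)).take (k - (j + 1)), e.2 ≠ s0 := by
            intro e he
            obtain ⟨t, h1, h2, hat, hlt, hee⟩ := hmem_seg prev face (j + 1) _ e he
            rw [hee]
            exact hkmin t h2 (by omega) (by omega)
          rw [foldl_stepA_true s0 s1 _ _ _ hseg2]
          have hkzip : k < (prev.zip face).length := by simp [hlen]; omega
          rw [List.drop_eq_getElem_cons hkzip, List.foldl_cons, List.getElem_zip, stepA_true]
          have hb2 : (!(face[k]'(by omega) == s0)) = false := by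
            simp only [Bool.not_eq_false', beq_iff_eq]
            exact hkval
          rw [hb2]
          have hklt' : k < prev.length := by omega
          have := ih (k + 1)
            (fa ++ [(prev[j], face[j])] ++ ((prev.zip face).drop (j + 1)).take (k - (j + 1)) ++
              [(prev[k]'(hklt'), face[k]'(by omega))])
            (fb ++ ((prev.zip face).drop i).take (j - i)) (by omega)
          rw [this]
          congr 1
          · -- fa argument
            simp only [List.map_append, List.map_cons, List.map_nil]
            have hcast : ((k : Int) + 1) = ((k + 1 : Nat) : Int) := by push_cast; ring
            rw [hcast, PySem.List.slice_natCast]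
            rw [hseg_map prev face hlen]
            rw [List.drop_eq_getElem_cons hjlt]
            have h2 : k + 1 - j = (k - (j + 1)) + 1 + 1 := by omega
            rw [h2, List.take_succ_cons, List.take_add_one, List.getElem?_drop]
            have h3 : j + 1 + (k - (j + 1)) = k := by omega
            rw [h3, List.getElem?_eq_getElem hklt']
            simp only [Option.toList_some, List.append_assoc, List.cons_append,
              List.nil_append]
          · simp only [List.map_append]
            rw [hseg_map prev face hlen, ← hj_def]

lemma edges_eq (face : List (Int × Int)) :
    (PySem.List.enumerate face).map
      (fun iv => (PySem.List.pyGetD face (iv.1 - 1) ((0 : Int), (0 : Int)), iv.2)) =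
    (PySem.List.slice face (some (-1)) none ++ PySem.List.slice face none (some (-1))).zip face := by
  rw [PySem.List.slice_from_neg_one, PySem.List.slice_to_neg_one]
  apply List.ext_getElem
  · simp
  · intro i h1 h2
    simp only [List.getElem_map, PySem.List.getElem_enumerate, List.getElem_zip]
    simp only [List.length_map, PySem.List.length_enumerate] at h1
    have hn : face ≠ [] := by intro h; simp [h] at h1
    simp only [Prod.mk.injEq]
    refine ⟨?_, trivial⟩
    by_cases hi : i = 0
    · subst hi
      have : ((0 : Int) + (0 : Nat)) - 1 = -1 := by norm_num
      rw [this, PySem.List.pyGetD_neg_one face (0,0) hn]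
      rw [List.getElem_append_left (by simp; omega)]
      rw [List.getElem_drop]
      rw [List.getLast_eq_getElem]
      congr 1
    · have : ((0 : Int) + (i : Nat)) - 1 = ((i - 1 : Nat) : Int) := by
        omega
      rw [this, PySem.List.pyGetD_natCast]
      rw [List.getElem_append_right (by simp; omega)]
      rw [List.getElem_dropLast]
      rw [List.getD_eq_getElem _ _ (by omega)]
      congr 1
      simp
      omega

-- ===== VERDICT (by name: the statement is the Claim_ definition above) =====
theorem cut_face_spec : Claim_equal_cut_face := by
  intro face s_line _
  show cut_face face s_line = cut_face_alt face s_line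
  unfold cut_face cut_face_alt
  rw [edges_eq]
  have hlen : (PySem.List.slice face (some (-1)) none ++
      PySem.List.slice face none (some (-1))).length = face.length := by
    rw [PySem.List.slice_from_neg_one, PySem.List.slice_to_neg_one]
    simp
  have h := cut_main s_line.1 s_line.2 _ face hlen face.length 0 [s_line] [] (by omega)
  rw [List.drop_zero] at h
  simp only [List.map_cons, List.map_nil] at h
  simp only [List.map_append, List.map_cons, List.map_nil]
  rw [← h]
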